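-- pv_equiv track=rewrite | github.com/ApplePeels/TestAssets | TestFlutter/copyAssets.py | _generalImageNameInfoList
-- ===== SOURCE A (Python) =====
-- def _generalImageNameInfoList(fileNameList):
-- 	fileNameInfoList = []
-- 	for fileName in fileNameList:
-- 		fileNameInfo = {'idiom':'universal', 'scale':'1x', 'filename':fileName}
-- 		if -1 != fileName.find('@2x'):
-- 			fileNameInfo['scale'] = '2x'
-- 		elif -1 != fileName.find('@3x'):
-- 			fileNameInfo['scale'] = '3x'
-- 		fileNameInfoList.append(fileNameInfo)
--
-- 	find2x = False
-- 	for fileName in fileNameList: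
-- 		if '@2x' in fileName:
-- 			find2x = True
-- 			break;
--
-- 	find3x = False
-- 	for fileName in fileNameList:
-- 		if '@3x' in fileName:
-- 			find3x = True
-- 			break;
--
-- 	if not find2x:
-- 		fileNameInfoList.append({'idiom':'universal', 'scale':'2x'})
-- 	if not find3x:
-- 		fileNameInfoList.append({'idiom':'universal', 'scale':'3x'})
--
-- 	return fileNameInfoList
-- ===== SOURCE B (Python) =====
-- def _generalImageNameInfoList(fileNameList):
--     infos = []
--     find2x = False
--     find3x = False
--     for name in fileNameList:
--         has2 = '@2x' in name
--         has3 = '@3x' in name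
--         find2x = find2x or has2
--         find3x = find3x or has3
--         scale = '2x' if has2 else ('3x' if has3 else '1x')
--         infos.append({'idiom': 'universal', 'scale': scale, 'filename': name})
--     if not find2x:
--         infos.append({'idiom': 'universal', 'scale': '2x'})
--     if not find3x:
--         infos.append({'idiom': 'universal', 'scale': '3x'})
--     return infos
-- ===== Notes on version B (the rewrite author's own statement) =====
-- stated objective: simpler
-- what changed: B replaces A's three separate passes over fileNameList (one building entries, one searching for '@2x', one for '@3x') with a single loop that builds each entry and accumulates both flags at once, then appends the two default entries.
import Mathlib
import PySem

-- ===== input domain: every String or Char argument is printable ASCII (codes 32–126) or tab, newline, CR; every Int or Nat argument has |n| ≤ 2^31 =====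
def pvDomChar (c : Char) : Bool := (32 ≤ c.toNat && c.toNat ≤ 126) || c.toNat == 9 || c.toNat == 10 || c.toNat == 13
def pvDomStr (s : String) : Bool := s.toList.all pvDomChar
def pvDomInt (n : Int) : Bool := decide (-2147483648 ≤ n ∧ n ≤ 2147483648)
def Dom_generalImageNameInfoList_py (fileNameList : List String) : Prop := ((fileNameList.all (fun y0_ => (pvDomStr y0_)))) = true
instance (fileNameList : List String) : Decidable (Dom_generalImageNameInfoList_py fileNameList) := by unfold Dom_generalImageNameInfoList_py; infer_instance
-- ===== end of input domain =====

-- B does A's work in one pass instead of three; objective: simpler.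

-- ===== PORT A =====
-- body of A's first loop: build the dict, overwrite 'scale' in place
def pvEntryA (fileName : String) : List (String × String) :=
  let d : PySem.Dict String String :=
    PySem.Dict.ofList [("idiom", "universal"), ("scale", "1x"), ("filename", fileName)]
  let d :=
    if PySem.Str.find fileName "@2x" ≠ -1 then d.insert "scale" "2x"
    else if PySem.Str.find fileName "@3x" ≠ -1 then d.insert "scale" "3x"
    else d
  d.items

-- A's 'for … if sub in fileName: found = True; break' search loop
def pvFindA (sub : String) : List String → Bool
  | [] => false
  | f :: rest => if PySem.Str.isIn sub f then true else pvFindA sub rest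

def generalImageNameInfoList_py (fileNameList : List String) : List (List (String × String)) :=
  let fileNameInfoList :=
    fileNameList.foldl (fun acc fileName => acc ++ [pvEntryA fileName]) []
  let find2x := pvFindA "@2x" fileNameList
  let find3x := pvFindA "@3x" fileNameList
  let fileNameInfoList :=
    if !find2x then fileNameInfoList ++ [[("idiom", "universal"), ("scale", "2x")]]
    else fileNameInfoList
  let fileNameInfoList :=
    if !find3x then fileNameInfoList ++ [[("idiom", "universal"), ("scale", "3x")]]
    else fileNameInfoList
  fileNameInfoList

-- ===== PORT B =====
-- one pass: entry plus both flags per iteration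
def pvStepB (st : List (List (String × String)) × Bool × Bool) (name : String) :
    List (List (String × String)) × Bool × Bool :=
  let has2 := PySem.Str.isIn "@2x" name
  let has3 := PySem.Str.isIn "@3x" name
  let scale := if has2 then "2x" else if has3 then "3x" else "1x"
  (st.1 ++ [[("idiom", "universal"), ("scale", scale), ("filename", name)]],
   st.2.1 || has2, st.2.2 || has3)

def generalImageNameInfoList_py_alt (fileNameList : List String) : List (List (String × String)) :=
  let st := fileNameList.foldl pvStepB ([], false, false)
  (st.1 ++ (if !st.2.1 then [[("idiom", "universal"), ("scale", "2x")]] else []))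
    ++ (if !st.2.2 then [[("idiom", "universal"), ("scale", "3x")]] else [])

-- ===== PRECONDITION & SPEC =====
def Spec_generalImageNameInfoList_py (fileNameList : List String) (out : List (List (String × String))) : Prop := out = generalImageNameInfoList_py_alt fileNameList
instance (fileNameList : List String) (out : List (List (String × String))) : Decidable (Spec_generalImageNameInfoList_py fileNameList out) := by unfold Spec_generalImageNameInfoList_py; infer_instance

-- ===== CLAIM (what is proved, stated in full; the proofs are below) =====
def Claim_equal_generalImageNameInfoList_py : Prop := ∀ (fileNameList : List String), Dom_generalImageNameInfoList_py fileNameList → Spec_generalImageNameInfoList_py fileNameList (generalImageNameInfoList_py fileNameList)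

-- ===== LEMMAS AND PROOFS =====

-- the per-element entries agree
theorem pvEntryA_eq (f : String) :
    pvEntryA f =
      [("idiom", "universal"),
       ("scale", if PySem.Str.isIn "@2x" f then "2x"
                 else if PySem.Str.isIn "@3x" f then "3x" else "1x"),
       ("filename", f)] := by
  unfold pvEntryA
  by_cases c2 : ['@','2','x'] <:+: f.toList <;> by_cases c3 : ['@','3','x'] <:+: f.toList <;>
    simp [c2, c3, PySem.Chars.find_eq_neg_one_iff, PySem.Chars.isIn_iff_infix,
      PySem.Str.find_eq, PySem.Str.isIn_eq, PySem.Dict.ofList, PySem.Dict.insert,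
      PySem.Dict.contains, PySem.Dict.empty, PySem.Dict.update, List.foldl]

-- A's break-search loop computes List.any
theorem pvFindA_eq_any (sub : String) (l : List String) :
    pvFindA sub l = l.any (fun f => PySem.Str.isIn sub f) := by
  induction l with
  | nil => rfl
  | cons f rest ih =>
    simp only [pvFindA, List.any_cons]
    by_cases h : PySem.Str.isIn sub f <;> simp [ih]

-- B's fold state characterised
theorem pvFoldB_eq (l : List String) (acc : List (List (String × String))) (b2 b3 : Bool) :
    l.foldl pvStepB (acc, b2, b3) =
      (acc ++ l.map (fun f =>
        [("idiom", "universal"),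
         ("scale", if PySem.Str.isIn "@2x" f then "2x"
                   else if PySem.Str.isIn "@3x" f then "3x" else "1x"),
         ("filename", f)]),
       b2 || l.any (fun f => PySem.Str.isIn "@2x" f),
       b3 || l.any (fun f => PySem.Str.isIn "@3x" f)) := by
  induction l generalizing acc b2 b3 with
  | nil => simp
  | cons f rest ih =>
    simp only [List.foldl_cons, List.map_cons, List.any_cons]
    rw [pvStepB, ih]
    simp [Bool.or_assoc]

-- ===== VERDICT (by name: the statement is the Claim_ definition above) =====
theorem generalImageNameInfoList_py_spec : Claim_equal_generalImageNameInfoList_py := by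
  intro fileNameList _
  unfold Spec_generalImageNameInfoList_py generalImageNameInfoList_py generalImageNameInfoList_py_alt
  rw [pvFoldB_eq]
  simp only [List.nil_append, Bool.false_or]
  rw [PySem.List.foldl_append_singleton_eq_map]
  rw [List.map_congr_left (fun f _ => pvEntryA_eq f)]
  rw [pvFindA_eq_any, pvFindA_eq_any]
  cases hA : fileNameList.any (fun f => PySem.Str.isIn "@2x" f) <;>
    cases hB : fileNameList.any (fun f => PySem.Str.isIn "@3x" f) <;>
      simp [List.append_assoc]
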